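-- pv_equiv track=rewrite | github.com/vintagevikas090/Programming_InterviewBit | Array/perfect_peak.py | perfectPeak
-- ===== SOURCE A (Python) =====
-- def perfectPeak(A):
--     N = len(A)
--     if N < 3:
--         return 0
--
--     left_max = [float('-inf')] * N
--     right_min = [float('inf')] * N
--
--     for i in range(1, N):
--         left_max[i] = max(left_max[i-1], A[i-1])
--
--     for i in range(N-2, -1, -1):
--         right_min[i] = min(right_min[i+1], A[i+1])
--
--
--     for i in range(1, N-1):
--         if left_max[i] < A[i] < right_min[i]:
--             return 1
--
--     return 0
-- ===== SOURCE B (Python) =====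
-- def perfectPeak(A):
--     # Single forward pass, O(1) extra space: keep a running max and a "live
--     # candidate" (an element that beat everything before it and everything
--     # seen after it so far). Greedy is complete: when a candidate dies, any
--     # other live record is larger and dies with it.
--     N = len(A)
--     if N < 3:
--         return 0
--     cand = None
--     cur_max = A[0]
--     for i in range(1, N):
--         x = A[i]
--         if cand is not None and x <= cand:
--             cand = None
--         if cand is None and i < N - 1 and x > cur_max:
--             cand = x
--         if x > cur_max:
--             cur_max = x
--     return 1 if cand is not None else 0
-- ===== Notes on version B (the rewrite author's own statement) =====
-- stated objective: alternative
-- what changed: Replaces A's three staged passes over two precomputed sentinel arrays (left_max, right_min) by a single forward pass with O(1) extra state: a running maximum plus a greedy 'live candidate' that is discarded when a later element is not above it, with a proof-backed argument that the greedy restart is complete; no auxiliary array is built.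
import Mathlib
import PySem

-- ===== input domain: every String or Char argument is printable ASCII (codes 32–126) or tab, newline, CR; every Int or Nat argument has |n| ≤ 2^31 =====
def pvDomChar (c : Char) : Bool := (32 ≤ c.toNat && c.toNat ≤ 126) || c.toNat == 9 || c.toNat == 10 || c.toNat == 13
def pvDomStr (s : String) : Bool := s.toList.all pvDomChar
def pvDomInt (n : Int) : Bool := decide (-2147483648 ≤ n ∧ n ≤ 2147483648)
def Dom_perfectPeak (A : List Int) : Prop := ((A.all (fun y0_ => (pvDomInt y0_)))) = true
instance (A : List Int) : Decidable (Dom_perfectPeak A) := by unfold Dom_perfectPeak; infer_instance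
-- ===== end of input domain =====

-- B replaces A's three staged passes over two precomputed sentinel arrays by a single forward
-- pass with O(1) extra state (running max + a greedy "live candidate"); same return value
-- (alternative algorithm, no speed claim).

-- ===== PORT A =====
-- Python's float('-inf') / float('inf') sentinels are ported as `none` (they are absorbed by
-- max/min and compare below/above every int, exactly like the infinities).
def lmax : Option Int → Int → Option Int
  | none, x => some x
  | some v, x => some (max v x)

def rmin : Option Int → Int → Option Int
  | none, x => some x
  | some v, x => some (min v x)

-- left_max[i] < A[i]  (none = -inf, so always true there)
def oltL : Option Int → Int → Bool
  | none, _ => true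
  | some v, a => decide (v < a)

-- A[i] < right_min[i]  (none = +inf, so always true there)
def oltR : Int → Option Int → Bool
  | _, none => true
  | a, some v => decide (a < v)

-- the third Python loop: first index with left_max[i] < A[i] < right_min[i] returns 1
def checkLoop : List ((Option Int × Int) × Option Int) → Int
  | [] => 0
  | ((l, a), r) :: t => if oltL l a && oltR a r then 1 else checkLoop t

-- left_max is the scan 'for i in range(1,N): left_max[i] = max(left_max[i-1], A[i-1])' over
-- A[0..N-2]; right_min the scan 'for i in range(N-2,-1,-1): …' over reversed A[1..]; the check
-- loop reads entries 1..N-2 of left_max, A and right_min.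
def perfectPeak (A : List Int) : Int :=
  if A.length < 3 then 0
  else
    checkLoop
      (((((List.scanl lmax none A.dropLast).drop 1).take (A.length - 2)).zip
          ((A.drop 1).take (A.length - 2))).zip
        ((((List.scanl rmin none (A.drop 1).reverse).reverse).drop 1).take (A.length - 2)))

-- ===== PORT B =====
-- the single forward pass: state is (candidate, running max); `t ≠ []` is Python's `i < N-1`
def bLoop : List Int → Option Int → Int → Int
  | [], cand, _ => if cand.isSome then 1 else 0
  | x :: t, cand, cm =>
      let c1 : Option Int :=
        match cand with
        | some c => if x ≤ c then none else some c
        | none => none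
      let c2 : Option Int := if c1 = none ∧ t ≠ [] ∧ cm < x then some x else c1
      bLoop t c2 (max cm x)

def perfectPeak_alt (A : List Int) : Int :=
  match A with
  | [] => 0
  | a0 :: rest => if rest.length < 2 then 0 else bLoop rest none a0

-- ===== PRECONDITION & SPEC =====
def Spec_perfectPeak (A : List Int) (out : Int) : Prop := out = perfectPeak_alt A
instance (A : List Int) (out : Int) : Decidable (Spec_perfectPeak A out) := by unfold Spec_perfectPeak; infer_instance

-- ===== CLAIM (what is proved, stated in full; the proofs are below) =====
def Claim_equal_perfectPeak : Prop := ∀ (A : List Int), Dom_perfectPeak A → Spec_perfectPeak A (perfectPeak A)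

-- ===== LEMMAS AND PROOFS =====

-- the common specification: some element of t, not the last one, is above cm and all elements
-- before it (within t) and below all elements after it
def GoodFrom (cm : Int) (t : List Int) : Prop :=
  ∃ u x v, t = u ++ x :: v ∧ v ≠ [] ∧ cm < x ∧ (∀ y ∈ u, y < x) ∧ ∀ y ∈ v, x < y

-- and its variant over the middle part with the last element z split off
def GoodZ (cm : Int) (mid : List Int) (z : Int) : Prop :=
  ∃ u x v, mid = u ++ x :: v ∧ cm < x ∧ (∀ y ∈ u, y < x) ∧ (∀ y ∈ v, x < y) ∧ x < z

lemma concat_inj {α : Type} {l₁ l₂ : List α} {a b : α}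
    (h : l₁ ++ [a] = l₂ ++ [b]) : l₁ = l₂ ∧ a = b := by
  have h' := congrArg List.reverse h
  simp at h'
  exact ⟨List.reverse_injective (by simp [h'.2]), h'.1⟩

lemma GoodZ_iff_GoodFrom (cm z : Int) (mid : List Int) :
    GoodZ cm mid z ↔ GoodFrom cm (mid ++ [z]) := by
  constructor
  · rintro ⟨u, x, v, rfl, hcm, hu, hv, hz⟩
    refine ⟨u, x, v ++ [z], by simp, by simp, hcm, hu, ?_⟩
    intro y hy
    rcases List.mem_append.mp hy with h | h
    · exact hv y h
    · simp at h; omega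
  · rintro ⟨u, x, v, heq, hv, hcm, hu, hvlt⟩
    rcases List.eq_nil_or_concat v with rfl | ⟨v', w, rfl⟩
    · exact absurd rfl hv
    · have heq' : mid ++ [z] = (u ++ x :: v') ++ [w] := by
        simpa [List.append_assoc] using heq
      obtain ⟨hm, hz⟩ := concat_inj heq'
      subst hz
      refine ⟨u, x, v', hm, hcm, hu, ?_, ?_⟩
      · intro y hy; exact hvlt y (by simp [hy])
      · exact hvlt z (by simp)

lemma GoodFrom_cons (cm x : Int) (t : List Int) :
    GoodFrom cm (x :: t) ↔
      (t ≠ [] ∧ cm < x ∧ ∀ y ∈ t, x < y) ∨ GoodFrom (max cm x) t := by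
  constructor
  · rintro ⟨u, x', v, heq, hv, hcm, hu, hvlt⟩
    cases u with
    | nil =>
        simp at heq
        obtain ⟨rfl, rfl⟩ := heq
        exact Or.inl ⟨hv, hcm, hvlt⟩
    | cons a u' =>
        simp at heq
        obtain ⟨rfl, rfl⟩ := heq
        refine Or.inr ⟨u', x', v, rfl, hv, ?_, ?_, hvlt⟩
        · have hx : x < x' := hu x (by simp)
          omega
        · intro y hy; exact hu y (by simp [hy])
  · rintro (⟨hv, hcm, hvlt⟩ | ⟨u, x', v, rfl, hv, hcm, hu, hvlt⟩)
    · exact ⟨[], x, t, rfl, hv, hcm, by simp, hvlt⟩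
    · refine ⟨x :: u, x', v, rfl, hv, by omega, ?_, hvlt⟩
      intro y hy
      rcases List.mem_cons.mp hy with rfl | h
      · omega
      · exact hu y h

-- ---- B-side characterisation ----

lemma bLoop01 (t : List Int) (c : Option Int) (cm : Int) :
    bLoop t c cm = 0 ∨ bLoop t c cm = 1 := by
  induction t generalizing c cm with
  | nil => cases c <;> simp [bLoop]
  | cons x t ih => simp only [bLoop]; exact ih _ _

lemma bLoop_spec (t : List Int) (cm : Int) (c? : Option Int)
    (hc : ∀ c, c? = some c → c ≤ cm) :
    bLoop t c? cm = 1 ↔ (∃ c, c? = some c ∧ ∀ y ∈ t, c < y) ∨ GoodFrom cm t := by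
  induction t generalizing cm c? with
  | nil =>
      have hg : ¬ GoodFrom cm [] := by
        rintro ⟨u, x, v, heq, -⟩
        exact absurd heq (by simp)
      cases c? <;> simp [bLoop, hg]
  | cons x t ih =>
      rw [GoodFrom_cons]
      cases c? with
      | none =>
          simp only [bLoop]
          by_cases h : t ≠ [] ∧ cm < x
          · rw [if_pos ⟨trivial, h⟩]
            rw [ih (max cm x) (some x) (by intro c hc'; obtain rfl := Option.some.inj hc'; omega)]
            constructor
            · rintro (⟨c, hc', hall⟩ | hg)
              · obtain rfl := Option.some.inj hc'
                exact Or.inr (Or.inl ⟨h.1, h.2, hall⟩)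
              · exact Or.inr (Or.inr hg)
            · rintro (⟨c, hc', -⟩ | (⟨-, -, hall⟩ | hg))
              · exact absurd hc' (by simp)
              · exact Or.inl ⟨x, rfl, hall⟩
              · exact Or.inr hg
          · rw [if_neg (by tauto)]
            rw [ih (max cm x) none (by intro c hc'; exact absurd hc' (by simp))]
            constructor
            · rintro (⟨c, hc', -⟩ | hg)
              · exact absurd hc' (by simp)
              · exact Or.inr (Or.inr hg)
            · rintro (⟨c, hc', -⟩ | (⟨ht, hcm, -⟩ | hg))
              · exact absurd hc' (by simp)
              · exact absurd ⟨ht, hcm⟩ h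
              · exact Or.inr hg
      | some c =>
          have hcc : c ≤ cm := hc c rfl
          by_cases hx : x ≤ c
          · simp only [bLoop, if_pos hx]
            by_cases h : t ≠ [] ∧ cm < x
            · omega
            · rw [if_neg (by tauto)]
              rw [ih (max cm x) none (by intro c' hc'; exact absurd hc' (by simp))]
              constructor
              · rintro (⟨c', hc', -⟩ | hg)
                · exact absurd hc' (by simp)
                · exact Or.inr (Or.inr hg)
              · rintro (⟨c', hc', hall⟩ | (⟨ht, hcm, -⟩ | hg))
                · obtain rfl := Option.some.inj hc'
                  have := hall x (by simp); omega
                · exact absurd ⟨ht, hcm⟩ h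
                · exact Or.inr hg
          · simp only [bLoop, if_neg hx]
            rw [if_neg (by simp)]
            rw [ih (max cm x) (some c) (by intro c' hc'; obtain rfl := Option.some.inj hc'; omega)]
            constructor
            · rintro (⟨c', hc', hall⟩ | hg)
              · obtain rfl := Option.some.inj hc'
                refine Or.inl ⟨c, rfl, ?_⟩
                intro y hy
                rcases List.mem_cons.mp hy with rfl | h
                · omega
                · exact hall y h
              · exact Or.inr (Or.inr hg)
            · rintro (⟨c', hc', hall⟩ | (⟨ht, hcm, hall⟩ | hg))
              · obtain rfl := Option.some.inj hc'
                exact Or.inl ⟨c, rfl, fun y hy => hall y (by simp [hy])⟩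
              · refine Or.inl ⟨c, rfl, ?_⟩
                intro y hy
                have := hall y hy; omega
              · exact Or.inr hg

-- ---- A-side characterisation ----

-- the Option scans are `some` of the plain Int scans once seeded with a real value
lemma scanl_lmax (cm : Int) (xs : List Int) :
    List.scanl lmax (some cm) xs = (List.scanl max cm xs).map some := by
  induction xs generalizing cm with
  | nil => simp
  | cons a t ih => rw [List.scanl_cons, List.scanl_cons]; simp [lmax, ih]

lemma scanl_rmin (cm : Int) (xs : List Int) :
    List.scanl rmin (some cm) xs = (List.scanl min cm xs).map some := by
  induction xs generalizing cm with
  | nil => simp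
  | cons a t ih => rw [List.scanl_cons, List.scanl_cons]; simp [rmin, ih]

lemma reverse_drop_one {α : Type} (l : List α) : l.reverse.drop 1 = l.dropLast.reverse := by
  rcases List.eq_nil_or_concat l with h | ⟨t, a, h⟩
  · subst h; rfl
  · subst h; simp

-- the suffix-min list read by A's third loop, in direct recursive form
def sufmins : List Int → Int → List Int
  | [], _ => []
  | _ :: t, z => (t.reverse.foldl min z) :: sufmins t z

lemma scanl_min_concat (z x : Int) (l : List Int) :
    List.scanl min z (l ++ [x]) = List.scanl min z l ++ [min (l.foldl min z) x] := by
  induction l generalizing z with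
  | nil => rfl
  | cons a t ih => rw [List.cons_append, List.scanl_cons, List.scanl_cons, ih]; rfl

lemma scanl_min_eq_dropLast_concat (z : Int) (l : List Int) :
    List.scanl min z l = (List.scanl min z l).dropLast ++ [l.foldl min z] := by
  induction l generalizing z with
  | nil => rfl
  | cons a t ih =>
      rw [List.scanl_cons, List.dropLast_cons_of_ne_nil List.scanl_ne_nil, List.cons_append,
        List.foldl_cons]
      rw [← ih]

lemma rm_eq (mid : List Int) (z : Int) :
    (List.scanl min z mid.reverse).dropLast.reverse = sufmins mid z := by
  induction mid with
  | nil => rfl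
  | cons x t ih =>
      rw [sufmins, ← ih]
      rw [show (x :: t).reverse = t.reverse ++ [x] by simp, scanl_min_concat,
        List.dropLast_concat]
      conv_lhs => rw [scanl_min_eq_dropLast_concat]
      simp

-- a < (suffix-min over t with final z)   iff   a below every element of t and below z
lemma lt_sufmin (a z : Int) (t : List Int) :
    a < t.reverse.foldl min z ↔ (∀ y ∈ t, a < y) ∧ a < z := by
  induction t with
  | nil => simp
  | cons y t ih =>
      rw [show (y :: t).reverse = t.reverse ++ [y] by simp, List.foldl_append]
      simp only [List.foldl_cons, List.foldl_nil, lt_min_iff, ih]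
      constructor
      · rintro ⟨⟨hall, hz⟩, hy⟩
        exact ⟨fun w hw => by rcases List.mem_cons.mp hw with rfl | h; exacts [hy, hall w h], hz⟩
      · rintro ⟨hall, hz⟩
        exact ⟨⟨fun w hw => hall w (by simp [hw]), hz⟩, hall y (by simp)⟩

lemma checkLoop01 (l : List ((Option Int × Int) × Option Int)) :
    checkLoop l = 0 ∨ checkLoop l = 1 := by
  induction l with
  | nil => exact Or.inl rfl
  | cons e t ih =>
      obtain ⟨⟨a, b⟩, c⟩ := e
      simp only [checkLoop]
      split
      · exact Or.inr rfl
      · exact ih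

lemma GoodZ_cons (cm x z : Int) (t : List Int) :
    GoodZ cm (x :: t) z ↔
      (cm < x ∧ (∀ y ∈ t, x < y) ∧ x < z) ∨ GoodZ (max cm x) t z := by
  constructor
  · rintro ⟨u, x', v, heq, hcm, hu, hv, hz⟩
    cases u with
    | nil =>
        simp at heq
        obtain ⟨rfl, rfl⟩ := heq
        exact Or.inl ⟨hcm, hv, hz⟩
    | cons a u' =>
        simp at heq
        obtain ⟨rfl, rfl⟩ := heq
        refine Or.inr ⟨u', x', v, rfl, ?_, ?_, hv, hz⟩
        · have := hu x (by simp); omega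
        · intro y hy; exact hu y (by simp [hy])
  · rintro (⟨hcm, hv, hz⟩ | ⟨u, x', v, rfl, hcm, hu, hv, hz⟩)
    · exact ⟨[], x, t, rfl, hcm, by simp, hv, hz⟩
    · refine ⟨x :: u, x', v, rfl, by omega, ?_, hv, hz⟩
      intro y hy
      rcases List.mem_cons.mp hy with rfl | h
      · omega
      · exact hu y h

lemma checkA (mid : List Int) (cm z : Int) :
    checkLoop ((((List.scanl max cm mid).dropLast.map some).zip mid).zip
        ((sufmins mid z).map some)) = 1
      ↔ GoodZ cm mid z := by
  induction mid generalizing cm with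
  | nil =>
      simp only [List.scanl_nil, sufmins, List.map_nil, List.zip_nil_right, checkLoop]
      constructor
      · intro h; exact absurd h (by decide)
      · rintro ⟨u, x, v, heq, -⟩; exact absurd heq (by simp)
  | cons a t ih =>
      rw [GoodZ_cons]
      rw [List.scanl_cons, List.dropLast_cons_of_ne_nil List.scanl_ne_nil]
      simp only [sufmins, List.map_cons, List.zip_cons_cons, checkLoop, oltL, oltR]
      by_cases h : cm < a ∧ a < t.reverse.foldl min z
      · rw [if_pos (by simpa only [Bool.and_eq_true, decide_eq_true_iff] using h)]
        have hlt := (lt_sufmin a z t).mp h.2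
        exact ⟨fun _ => Or.inl ⟨h.1, hlt.1, hlt.2⟩, fun _ => rfl⟩
      · rw [if_neg (by simp only [Bool.and_eq_true, decide_eq_true_iff]; exact h)]
        rw [ih (max cm a)]
        constructor
        · intro hg; exact Or.inr hg
        · rintro (⟨hcm, hall, hz⟩ | hg)
          · exact absurd ⟨hcm, (lt_sufmin a z t).mpr ⟨hall, hz⟩⟩ h
          · exact hg

-- the main case: A = a0 :: mid ++ [z] with mid ≠ []
lemma perfectPeak_concat (a0 z : Int) (mid : List Int) (hm : mid ≠ []) :
    perfectPeak (a0 :: (mid ++ [z])) = perfectPeak_alt (a0 :: (mid ++ [z])) := by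
  have hk : 1 ≤ mid.length := List.length_pos_iff.mpr hm
  have hlen : (a0 :: (mid ++ [z])).length = mid.length + 2 := by simp
  rw [perfectPeak, hlen, if_neg (by omega)]
  have hdl : (a0 :: (mid ++ [z])).dropLast = a0 :: mid := by
    rw [List.dropLast_cons_of_ne_nil (by simp), List.dropLast_concat]
  have hd1 : (a0 :: (mid ++ [z])).drop 1 = mid ++ [z] := rfl
  rw [hdl, hd1]
  -- left scan: drop the leading none (= -inf), which is never read
  have hL : (List.scanl lmax none (a0 :: mid)).drop 1 = (List.scanl max a0 mid).map some := by
    rw [List.scanl_cons]; simp [lmax, scanl_lmax]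
  -- right scan: reverse plumbing
  have hR : ((List.scanl rmin none ((mid ++ [z]).reverse)).reverse).drop 1
      = (((List.scanl min z mid.reverse).dropLast.reverse).map some)
        ++ [(none : Option Int)] := by
    rw [show (mid ++ [z]).reverse = z :: mid.reverse by simp, List.scanl_cons]
    have : rmin none z = some z := rfl
    rw [this, scanl_rmin, List.reverse_cons,
      List.drop_append_of_le_length (by simp),
      reverse_drop_one, ← List.map_dropLast, ← List.map_reverse]
  rw [hL, hR, show mid.length + 2 - 2 = mid.length from by omega]
  -- lengths: the three `take (N-2)` each keep exactly mid.length elements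
  have htL : ((List.scanl max a0 mid).map some).take mid.length
      = (List.scanl max a0 mid).dropLast.map some := by
    rw [← List.map_take, List.dropLast_eq_take]
    congr 1
    simp [List.length_scanl]
  have htA : (mid ++ [z]).take mid.length = mid := by
    simp
  have hrmlen : (((List.scanl min z mid.reverse).dropLast.reverse).map some).length
      = mid.length := by
    simp
  have htR : ((((List.scanl min z mid.reverse).dropLast.reverse).map some)
        ++ [(none : Option Int)]).take mid.length
      = ((List.scanl min z mid.reverse).dropLast.reverse).map some := by
    rw [List.take_append_of_le_length (by omega), ← hrmlen, List.take_length]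
  rw [htL, htA, htR, rm_eq]
  -- B's side
  rw [perfectPeak_alt]
  rw [if_neg (by simp; omega)]
  -- both sides are 0/1-valued and equal 1 exactly on the common specification
  have hA := checkA mid a0 z
  have hB := bLoop_spec (mid ++ [z]) a0 none (by intro c hc; exact absurd hc (by simp))
  have hBnone : ¬ ∃ c, (none : Option Int) = some c ∧ ∀ y ∈ mid ++ [z], c < y := by
    rintro ⟨c, hc, -⟩; exact absurd hc (by simp)
  have hGZ := GoodZ_iff_GoodFrom a0 z mid
  have hiff : checkLoop ((((List.scanl max a0 mid).dropLast.map some).zip mid).zip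
        ((sufmins mid z).map some)) = 1 ↔ bLoop (mid ++ [z]) none a0 = 1 := by
    rw [hA, hB, hGZ]
    tauto
  rcases checkLoop01 ((((List.scanl max a0 mid).dropLast.map some).zip mid).zip
      ((sufmins mid z).map some)) with h0 | h1
  · rcases bLoop01 (mid ++ [z]) none a0 with hb0 | hb1
    · rw [h0, hb0]
    · exact absurd (hiff.mpr hb1) (by omega)
  · rw [h1, hiff.mp h1]

-- ===== VERDICT (by name: the statement is the Claim_ definition above) =====
theorem perfectPeak_spec : Claim_equal_perfectPeak := by
  intro A _
  unfold Spec_perfectPeak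
  match A with
  | [] => rfl
  | [a] => rfl
  | a0 :: rest =>
      rcases List.eq_nil_or_concat rest with h | ⟨mid, z, h⟩
      · subst h; rfl
      · subst h
        rw [List.concat_eq_append]
        cases mid with
        | nil => rfl
        | cons b u => exact perfectPeak_concat a0 z (b :: u) (by simp)
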